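-- pv_equiv track=rewrite | github.com/HorizenOfficial/zen | qa/rpc-tests/prioritisetransaction.py | check_if_mined_by_priority
-- ===== SOURCE A (Python) =====
-- def check_if_mined_by_priority(tx, last_tx_by_priority, block):
--     tx_mined_by_priority = False
--     tx_mined = False
--     last_tx_by_priority_mined = False
--     for index in range(len(block["tx"])):
--         if (block["tx"][index] == last_tx_by_priority):
--             last_tx_by_priority_mined = True
--         if (block["tx"][index] == tx):
--             tx_mined = True
--             if (not last_tx_by_priority_mined):
--                 tx_mined_by_priority = True
--             break
--     return tx_mined_by_priority, tx_mined
-- ===== SOURCE B (Python) =====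
-- def check_if_mined_by_priority(tx, last_tx_by_priority, block):
--     txs = block["tx"]
--     try:
--         pos_tx = txs.index(tx)
--     except ValueError:
--         pos_tx = None
--     try:
--         pos_last = txs.index(last_tx_by_priority)
--     except ValueError:
--         pos_last = None
--     tx_mined = pos_tx is not None
--     tx_mined_by_priority = tx_mined and (pos_last is None or pos_last > pos_tx)
--     return tx_mined_by_priority, tx_mined
-- ===== Notes on version B (the rewrite author's own statement) =====
-- stated objective: idiomatic
-- what changed: Replaced the interleaved flag-driven index loop (with break and three mutable flags) by computing both first positions once and comparing them: tx_mined = tx found, tx_mined_by_priority = tx found and last-priority tx absent or strictly later.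
-- outside the precondition, e.g. on check_if_mined_by_priority('a', 'b', {}): A raises KeyError, B raises KeyError
import Mathlib
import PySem

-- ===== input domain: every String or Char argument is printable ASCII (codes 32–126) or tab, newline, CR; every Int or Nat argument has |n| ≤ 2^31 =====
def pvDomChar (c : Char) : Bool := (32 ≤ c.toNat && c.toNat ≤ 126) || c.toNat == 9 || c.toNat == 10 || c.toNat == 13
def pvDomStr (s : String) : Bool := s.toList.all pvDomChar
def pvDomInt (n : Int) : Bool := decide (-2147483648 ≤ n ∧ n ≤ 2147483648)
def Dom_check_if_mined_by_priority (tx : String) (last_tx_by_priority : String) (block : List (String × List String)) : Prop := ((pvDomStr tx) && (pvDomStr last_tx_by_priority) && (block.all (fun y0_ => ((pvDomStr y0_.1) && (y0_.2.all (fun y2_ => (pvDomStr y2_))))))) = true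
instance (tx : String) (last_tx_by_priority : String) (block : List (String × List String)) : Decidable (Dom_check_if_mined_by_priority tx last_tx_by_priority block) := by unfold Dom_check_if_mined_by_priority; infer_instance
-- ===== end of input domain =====

-- B replaces A's interleaved flag-driven scan with computing both first positions and comparing them (idiomatic decomposition; return value only).

-- dict[k] = first-match lookup in the association list (KeyError = none, excluded by Pre_)
def pvLookup (block : List (String × List String)) (k : String) : Option (List String) :=
  (block.find? (fun p => p.1 == k)).map (·.2)

-- ===== PORT A =====
-- literal port of A's for-loop with its three flags and break, as structural recursion over block["tx"]
def pvALoop (tx last_tx_by_priority : String) (txs : List String)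
    (tx_mined_by_priority tx_mined last_mined : Bool) : Bool × Bool :=
  match txs with
  | [] => (tx_mined_by_priority, tx_mined)
  | t :: rest =>
    let last_mined := if t == last_tx_by_priority then true else last_mined
    if t == tx then
      (if !last_mined then true else tx_mined_by_priority, true)   -- break
    else
      pvALoop tx last_tx_by_priority rest tx_mined_by_priority tx_mined last_mined

def check_if_mined_by_priority (tx : String) (last_tx_by_priority : String) (block : List (String × List String)) : Bool × Bool :=
  pvALoop tx last_tx_by_priority ((pvLookup block "tx").getD []) false false false

-- ===== PORT B =====
def check_if_mined_by_priority_alt (tx : String) (last_tx_by_priority : String) (block : List (String × List String)) : Bool × Bool :=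
  let txs := (pvLookup block "tx").getD []
  let posTx := PySem.List.index? txs tx
  let posLast := PySem.List.index? txs last_tx_by_priority
  let tx_mined := posTx.isSome
  let by_priority := tx_mined && (match posTx, posLast with
    | _, none => true
    | some i, some j => decide (i < j)
    | none, some _ => false)
  (by_priority, tx_mined)

-- ===== PRECONDITION & SPEC =====
-- Pre_ excludes exactly the inputs where block has no "tx" key, on which A raises KeyError.
def Pre_check_if_mined_by_priority (tx : String) (last_tx_by_priority : String) (block : List (String × List String)) : Prop :=
  (pvLookup block "tx").isSome = true
instance (tx : String) (last_tx_by_priority : String) (block : List (String × List String)) : Decidable (Pre_check_if_mined_by_priority tx last_tx_by_priority block) := by unfold Pre_check_if_mined_by_priority; infer_instance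

def pvWitness_check_if_mined_by_priority : String × String × (List (String × List String)) :=
  ("a", "b", [("tx", ["b", "a", "c"])])

def Spec_check_if_mined_by_priority (tx : String) (last_tx_by_priority : String) (block : List (String × List String)) (out : Bool × Bool) : Prop := out = check_if_mined_by_priority_alt tx last_tx_by_priority block
instance (tx : String) (last_tx_by_priority : String) (block : List (String × List String)) (out : Bool × Bool) : Decidable (Spec_check_if_mined_by_priority tx last_tx_by_priority block out) := by unfold Spec_check_if_mined_by_priority; infer_instance

-- ===== CLAIM (what is proved, stated in full; the proofs are below) =====
def Claim_equal_check_if_mined_by_priority : Prop := ∀ (tx : String) (last_tx_by_priority : String) (block : List (String × List String)), Dom_check_if_mined_by_priority tx last_tx_by_priority block → Pre_check_if_mined_by_priority tx last_tx_by_priority block → Spec_check_if_mined_by_priority tx last_tx_by_priority block (check_if_mined_by_priority tx last_tx_by_priority block)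

-- ===== LEMMAS AND PROOFS =====

-- A's loop with flags (false, false, lm) computes B's positions-comparison, for any pending last_mined flag lm.
theorem pvALoop_eq (tx last : String) (txs : List String) (lm : Bool) :
    pvALoop tx last txs false false lm =
      ((PySem.List.index? txs tx).isSome &&
        (!lm && (match PySem.List.index? txs tx, PySem.List.index? txs last with
                 | _, none => true
                 | some i, some j => decide (i < j)
                 | none, some _ => true)),
       (PySem.List.index? txs tx).isSome) := by
  induction txs generalizing lm with
  | nil => simp [pvALoop, PySem.List.index?]
  | cons t rest ih =>
    by_cases htx : (t == tx) = true
    · have htx' : t = tx := by simpa using htx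
      subst htx'
      have hL : pvALoop t last (t :: rest) false false lm
          = (if !(if (t == last) = true then true else lm) then true else false, true) := by
        simp [pvALoop]
      rw [hL, PySem.List.index?_cons_self]
      by_cases hlast : (t == last) = true
      · have h' : t = last := by simpa using hlast
        subst h'
        rw [PySem.List.index?_cons_self]
        simp
      · have hne : t ≠ last := by simpa using hlast
        rw [PySem.List.index?_cons_of_ne _ hne]
        cases h : PySem.List.index? rest last with
        | none => cases lm <;> simp [hlast]
        | some j => cases lm <;> simp [hlast]
    · have hne : t ≠ tx := by simpa using htx
      have hL : pvALoop tx last (t :: rest) false false lm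
          = pvALoop tx last rest false false (if (t == last) = true then true else lm) := by
        simp [pvALoop, htx]
      rw [hL, ih, PySem.List.index?_cons_of_ne _ hne]
      by_cases hlast : (t == last) = true
      · have h' : t = last := by simpa using hlast
        subst h'
        rw [PySem.List.index?_cons_self]
        cases h1 : PySem.List.index? rest tx with
        | none =>
          cases h2 : PySem.List.index? rest t with
          | none => simp
          | some j => simp
        | some i =>
          cases h2 : PySem.List.index? rest t with
          | none => simp
          | some j => simp
      · have hne' : t ≠ last := by simpa using hlast
        rw [PySem.List.index?_cons_of_ne _ hne']
        cases h1 : PySem.List.index? rest tx with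
        | none =>
          cases h2 : PySem.List.index? rest last with
          | none => simp [hlast]
          | some j => simp [hlast]
        | some i =>
          cases h2 : PySem.List.index? rest last with
          | none => simp [hlast]
          | some j => simp [hlast, Nat.succ_lt_succ_iff]

-- ===== VERDICT (by name: the statement is the Claim_ definition above) =====
theorem check_if_mined_by_priority_spec : Claim_equal_check_if_mined_by_priority := by
  intro tx last block _ _
  unfold Spec_check_if_mined_by_priority check_if_mined_by_priority check_if_mined_by_priority_alt
  rw [pvALoop_eq]
  cases h1 : PySem.List.index? ((pvLookup block "tx").getD []) tx with
  | none =>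
    cases h2 : PySem.List.index? ((pvLookup block "tx").getD []) last with
    | none => rw [PySem.List.index?_eq_idxOf?] at h1 h2; simp [h1, h2, ← List.idxOf?_eq_none_iff]
    | some j => rw [PySem.List.index?_eq_idxOf?] at h1 h2; simp [h1, h2, ← List.idxOf?_eq_none_iff]
  | some i =>
    cases h2 : PySem.List.index? ((pvLookup block "tx").getD []) last with
    | none => rw [PySem.List.index?_eq_idxOf?] at h1 h2; simp [h1, h2, ← List.idxOf?_eq_none_iff]
    | some j => rw [PySem.List.index?_eq_idxOf?] at h1 h2; simp [h1, h2, ← List.idxOf?_eq_none_iff]
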